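-- pv_equiv track=rewrite | github.com/MeenakshiKathiresan/leetcode-solutions | 1818-maximum-score-from-removing-substrings/1818-maximum-score-from-removing-substrings.py | maximumGain
-- ===== SOURCE A (Python) =====
-- def maximumGain(s: str, x: int, y: int) -> int:
--
--     def remove(str_list, first, second, score):
--         stack = []
--         res = 0
--         for ch in str_list:
--             if stack and ch == second and stack[-1] == first:
--                 res += score
--                 stack.pop()
--             else:
--                 stack.append(ch)
--
--         return stack, res
--
--     if x > y:
--         str_list, scoreX = remove(list(s), "a", "b", x)
--         _, scoreY = remove(str_list, "b", "a", y)
--         return scoreX + scoreY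
--     else:
--
--         str_list, scoreY = remove(list(s), "b", "a", y)
--         _, scoreX = remove(str_list, "a", "b", x)
--         return scoreX + scoreY
-- ===== SOURCE B (Python) =====
-- def maximumGain(s: str, x: int, y: int) -> int:
--     # single pass with two counters per run of {a,b}; no stacks
--     if x > y:
--         first, second, hi, lo = 'a', 'b', x, y
--     else:
--         first, second, hi, lo = 'b', 'a', y, x
--     c1 = c2 = total = 0
--     for ch in s:
--         if ch == first:
--             c1 += 1
--         elif ch == second:
--             if c1:
--                 c1 -= 1
--                 total += hi
--             else:
--                 c2 += 1
--         else:
--             total += min(c1, c2) * lo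
--             c1 = c2 = 0
--     return total + min(c1, c2) * lo
-- ===== Notes on version B (the rewrite author's own statement) =====
-- stated objective: alternative
-- what changed: Replaces A's two stack passes (remove high pair, then rescan the residual list for the low pair) by a single pass that keeps just two integer counters per maximal run of {a,b} characters, matching the high pair online and adding min(counters)*low_score when the run ends.
import Mathlib
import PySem

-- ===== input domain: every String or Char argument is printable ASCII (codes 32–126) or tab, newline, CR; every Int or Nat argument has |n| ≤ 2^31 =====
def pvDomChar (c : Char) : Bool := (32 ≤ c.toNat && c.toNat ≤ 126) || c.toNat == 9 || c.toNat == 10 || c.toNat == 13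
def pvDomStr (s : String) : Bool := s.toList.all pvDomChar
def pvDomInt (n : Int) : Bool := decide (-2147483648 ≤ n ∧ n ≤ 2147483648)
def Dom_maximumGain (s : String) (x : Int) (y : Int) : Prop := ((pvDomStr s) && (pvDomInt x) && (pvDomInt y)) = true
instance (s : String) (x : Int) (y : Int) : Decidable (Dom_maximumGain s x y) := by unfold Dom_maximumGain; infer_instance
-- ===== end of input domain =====

-- B replaces A's two stack passes by one pass with two integer counters per run (objective: alternative).

-- ===== PORT A =====
-- Python's list used as a stack (append / stack[-1] / pop at the end) is represented
-- newest-first (cons at the head); it is reversed on return so element order matches Python.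
def removeStep (first second : Char) (score : Int) (p : List Char × Int) (ch : Char) : List Char × Int :=
  match p with
  | (stk, res) =>
    match stk with
    | t :: rest => if ch = second ∧ t = first then (rest, res + score) else (ch :: t :: rest, res)
    | [] => ([ch], res)

def removeA (l : List Char) (first second : Char) (score : Int) : List Char × Int :=
  let p := l.foldl (removeStep first second score) ([], 0)
  (p.1.reverse, p.2)

def maximumGain (s : String) (x : Int) (y : Int) : Int :=
  if x > y then
    let p := removeA s.toList 'a' 'b' x
    let q := removeA p.1 'b' 'a' y
    p.2 + q.2
  else
    let p := removeA s.toList 'b' 'a' y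
    let q := removeA p.1 'a' 'b' x
    q.2 + p.2

-- ===== PORT B =====
def gainStep (first second : Char) (hi lo : Int) (st : Int × Int × Int) (ch : Char) : Int × Int × Int :=
  match st with
  | (c1, c2, total) =>
    if ch = first then (c1 + 1, c2, total)
    else if ch = second then
      (if c1 ≠ 0 then (c1 - 1, c2, total + hi) else (c1, c2 + 1, total))
    else (0, 0, total + min c1 c2 * lo)

def maximumGain_alt (s : String) (x : Int) (y : Int) : Int :=
  let q := if x > y then ('a', 'b', x, y) else ('b', 'a', y, x)
  let t := s.toList.foldl (gainStep q.1 q.2.1 q.2.2.1 q.2.2.2) (0, 0, 0)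
  t.2.2 + min t.1 t.2.1 * q.2.2.2

-- ===== PRECONDITION & SPEC =====
def Spec_maximumGain (s : String) (x : Int) (y : Int) (out : Int) : Prop := out = maximumGain_alt s x y
instance (s : String) (x : Int) (y : Int) (out : Int) : Decidable (Spec_maximumGain s x y out) := by unfold Spec_maximumGain; infer_instance

-- ===== CLAIM (what is proved, stated in full; the proofs are below) =====
def Claim_equal_maximumGain : Prop := ∀ (s : String) (x : Int) (y : Int), Dom_maximumGain s x y → Spec_maximumGain s x y (maximumGain s x y)

-- ===== LEMMAS AND PROOFS =====

lemma rep_cons {x : Char} {n : Nat} {l : List Char} :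
    List.replicate n x ++ x :: l = List.replicate (n + 1) x ++ l := by
  simp [List.replicate_succ']

-- pushing a char c ≠ b never pops (the pop condition requires ch = b)
lemma run_push_ne (a b : Char) (sc : Int) (c : Char) (hc : c ≠ b) :
    ∀ (n : Nat) (S : List Char) (r : Int),
      (List.replicate n c).foldl (removeStep a b sc) (S, r) = (List.replicate n c ++ S, r) := by
  intro n
  induction n with
  | zero => intro S r; simp
  | succ n ih =>
    intro S r
    have hstep : removeStep a b sc (S, r) c = (c :: S, r) := by
      cases S with
      | nil => simp [removeStep]
      | cons t rest => simp [removeStep, hc]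
    have hrl : List.replicate (n + 1) c = c :: List.replicate n c := rfl
    rw [hrl, List.foldl_cons, hstep, ih]
    simp [List.replicate_succ, rep_cons]

-- pushing b's onto a stack whose top is not a never pops
lemma run_push_blocked (a b : Char) (sc : Int) (hab : a ≠ b) :
    ∀ (n : Nat) (S : List Char) (r : Int), S.head? ≠ some a →
      (List.replicate n b).foldl (removeStep a b sc) (S, r) = (List.replicate n b ++ S, r) := by
  intro n
  induction n with
  | zero => intro S r _; simp
  | succ n ih =>
    intro S r hS
    have hstep : removeStep a b sc (S, r) b = (b :: S, r) := by
      cases S with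
      | nil => simp [removeStep]
      | cons t rest =>
        have ht : t ≠ a := by intro h; exact hS (by simp [h])
        simp [removeStep, ht]
    have hrl : List.replicate (n + 1) b = b :: List.replicate n b := rfl
    rw [hrl, List.foldl_cons, hstep, ih (b :: S) r (by simp [Ne.symm hab])]
    simp [List.replicate_succ, rep_cons]

-- b's consume the a's on top of the stack, min(n,m) pops, then push the surplus
lemma run_consume (a b : Char) (sc : Int) (hab : a ≠ b) :
    ∀ (n m : Nat) (S : List Char) (r : Int), S.head? ≠ some a →
      (List.replicate n b).foldl (removeStep a b sc) (List.replicate m a ++ S, r)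
        = (List.replicate (n - m) b ++ List.replicate (m - n) a ++ S, r + (min n m : Nat) * sc) := by
  intro n
  induction n with
  | zero => intro m S r _; simp
  | succ n ih =>
    intro m S r hS
    cases m with
    | zero =>
      simp only [List.replicate_zero, List.nil_append]
      have hstep : removeStep a b sc (S, r) b = (b :: S, r) := by
        cases S with
        | nil => simp [removeStep]
        | cons t rest =>
          have ht : t ≠ a := by intro h; exact hS (by simp [h])
          simp [removeStep, ht]
      have hrl : List.replicate (n + 1) b = b :: List.replicate n b := rfl
      rw [hrl, List.foldl_cons, hstep,
        run_push_blocked a b sc hab n (b :: S) r (by simp [Ne.symm hab])]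
      simp [List.replicate_succ, rep_cons]
    | succ m =>
      have hstep : removeStep a b sc (List.replicate (m + 1) a ++ S, r) b
          = (List.replicate m a ++ S, r + sc) := by
        simp [List.replicate_succ, removeStep]
      have hrl : List.replicate (n + 1) b = b :: List.replicate n b := rfl
      rw [hrl, List.foldl_cons, hstep, ih m S (r + sc) hS]
      have hmin : (min (n + 1) (m + 1) : Nat) = min n m + 1 := by omega
      have : ((n : Nat) + 1) - (m + 1) = n - m := by omega
      rw [this]
      have : ((m : Nat) + 1) - (n + 1) = m - n := by omega
      rw [this, hmin]
      push_cast
      ring_nf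

-- a run of cs's then cf's processed by the second pass (pair cs,cf) from a blocked stack
lemma run_block (cf cs : Char) (lo : Int) (hne : cf ≠ cs) (c1 c2 : Nat) (S : List Char) (r : Int)
    (hS : S.head? ≠ some cs) :
    (List.replicate c2 cs ++ List.replicate c1 cf).foldl (removeStep cs cf lo) (S, r)
      = (List.replicate (c1 - c2) cf ++ List.replicate (c2 - c1) cs ++ S, r + (min c1 c2 : Nat) * lo) := by
  rw [List.foldl_append, run_push_ne cs cf lo cs (Ne.symm hne) c2 S r]
  exact run_consume cs cf lo (Ne.symm hne) c1 c2 S r hS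

-- MAIN INVARIANT.  Pass-1 stack (newest-first) = cf^c1 ++ cs^c2 ++ rest, where rest starts with a
-- non-{cf,cs} char; (S, r) is the pass-2 result on the already-frozen part rest; B's counters are (c1, c2).
lemma main_equiv (cf cs : Char) (hi lo : Int) (hne : cf ≠ cs) :
    ∀ (l : List Char) (c1 c2 : Nat) (rest : List Char) (res acc : Int) (S : List Char) (r : Int),
      (∀ c, rest.head? = some c → c ≠ cf ∧ c ≠ cs) →
      rest.reverse.foldl (removeStep cs cf lo) ([], 0) = (S, r) →
      S.head? ≠ some cs →
      (l.foldl (removeStep cf cs hi) (List.replicate c1 cf ++ List.replicate c2 cs ++ rest, res)).2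
        + ((l.foldl (removeStep cf cs hi) (List.replicate c1 cf ++ List.replicate c2 cs ++ rest, res)).1.reverse.foldl
            (removeStep cs cf lo) ([], 0)).2
        + acc
      = res + r
        + (l.foldl (gainStep cf cs hi lo) ((c1 : Int), (c2 : Int), acc)).2.2
        + min (l.foldl (gainStep cf cs hi lo) ((c1 : Int), (c2 : Int), acc)).1
              (l.foldl (gainStep cf cs hi lo) ((c1 : Int), (c2 : Int), acc)).2.1 * lo := by
  intro l
  induction l with
  | nil =>
    intro c1 c2 rest res acc S r hrest hS2 hSb
    simp only [List.foldl_nil]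
    have hrev : (List.replicate c1 cf ++ List.replicate c2 cs ++ rest).reverse
        = rest.reverse ++ (List.replicate c2 cs ++ List.replicate c1 cf) := by
      simp [List.reverse_append]
    rw [hrev, List.foldl_append, hS2, run_block cf cs lo hne c1 c2 S r hSb]
    have : min (c1 : Int) (c2 : Int) = ((min c1 c2 : Nat) : Int) := by push_cast; ring_nf
    rw [this]
    ring
  | cons ch t ih =>
    intro c1 c2 rest res acc S r hrest hS2 hSb
    by_cases hchf : ch = cf
    · -- push a cf, B increments c1
      subst hchf
      have hstep : removeStep ch cs hi (List.replicate c1 ch ++ List.replicate c2 cs ++ rest, res) ch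
          = (List.replicate (c1 + 1) ch ++ List.replicate c2 cs ++ rest, res) := by
        cases hstk : List.replicate c1 ch ++ List.replicate c2 cs ++ rest with
        | nil => simp [removeStep, ← hstk, List.replicate_succ]
        | cons u v => simp [removeStep, hne, ← hstk, List.replicate_succ]
      have hg : gainStep ch cs hi lo ((c1 : Int), (c2 : Int), acc) ch
          = (((c1 + 1 : Nat) : Int), (c2 : Int), acc) := by
        simp [gainStep]
      rw [List.foldl_cons, hstep, List.foldl_cons, hg]
      exact ih (c1 + 1) c2 rest res acc S r hrest hS2 hSb
    · by_cases hchs : ch = cs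
      · subst hchs
        cases c1 with
        | zero =>
          -- no pending cf: push the cs, B increments c2
          have hstep : removeStep cf ch hi (List.replicate 0 cf ++ List.replicate c2 ch ++ rest, res) ch
              = (List.replicate 0 cf ++ List.replicate (c2 + 1) ch ++ rest, res) := by
            cases c2 with
            | zero =>
              cases rest with
              | nil => simp [removeStep]
              | cons u v =>
                have := hrest u (by simp)
                simp [removeStep, this.1, List.replicate_succ]
            | succ m => simp [List.replicate_succ, removeStep, Ne.symm hne]
          have hg : gainStep cf ch hi lo (((0 : Nat) : Int), (c2 : Int), acc) ch
              = (((0 : Nat) : Int), ((c2 + 1 : Nat) : Int), acc) := by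
            simp [gainStep, hchf]
          rw [List.foldl_cons, hstep, List.foldl_cons, hg]
          exact ih 0 (c2 + 1) rest res acc S r hrest hS2 hSb
        | succ m =>
          -- pending cf on top: pop, score hi; B decrements c1 and adds hi
          have hstep : removeStep cf ch hi (List.replicate (m + 1) cf ++ List.replicate c2 ch ++ rest, res) ch
              = (List.replicate m cf ++ List.replicate c2 ch ++ rest, res + hi) := by
            simp [List.replicate_succ, removeStep]
          have hg : gainStep cf ch hi lo (((m + 1 : Nat) : Int), (c2 : Int), acc) ch
              = (((m : Nat) : Int), (c2 : Int), acc + hi) := by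
            have h1 : ((m + 1 : Nat) : Int) ≠ 0 := by push_cast; omega
            have h2 : ((m + 1 : Nat) : Int) - 1 = ((m : Nat) : Int) := by push_cast; ring
            simp [gainStep, hchf]
            omega
          rw [List.foldl_cons, hstep, List.foldl_cons, hg]
          have := ih m c2 rest (res + hi) (acc + hi) S r hrest hS2 hSb
          linarith
      · -- a separator: the run is frozen into rest, B flushes min(c1,c2)*lo
        have hstep : removeStep cf cs hi (List.replicate c1 cf ++ List.replicate c2 cs ++ rest, res) ch
            = (ch :: (List.replicate c1 cf ++ List.replicate c2 cs ++ rest), res) := by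
          cases hstk : List.replicate c1 cf ++ List.replicate c2 cs ++ rest with
          | nil => simp [removeStep, ← hstk]
          | cons u v => simp [removeStep, hchs, ← hstk]
        have hg : gainStep cf cs hi lo ((c1 : Int), (c2 : Int), acc) ch
            = (((0 : Nat) : Int), ((0 : Nat) : Int), acc + ((min c1 c2 : Nat) : Int) * lo) := by
          simp [gainStep, hchf, hchs]
        rw [List.foldl_cons, hstep, List.foldl_cons, hg]
        -- pass-2 state for the new frozen part
        have hrev : (ch :: (List.replicate c1 cf ++ List.replicate c2 cs ++ rest)).reverse
            = rest.reverse ++ (List.replicate c2 cs ++ List.replicate c1 cf) ++ [ch] := by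
          simp [List.reverse_append]
        have hS2' : (ch :: (List.replicate c1 cf ++ List.replicate c2 cs ++ rest)).reverse.foldl
            (removeStep cs cf lo) ([], 0)
            = (ch :: (List.replicate (c1 - c2) cf ++ List.replicate (c2 - c1) cs ++ S),
               r + ((min c1 c2 : Nat) : Int) * lo) := by
          rw [hrev, List.foldl_append, List.foldl_append, hS2,
            run_block cf cs lo hne c1 c2 S r hSb]
          simp only [List.foldl_cons, List.foldl_nil]
          cases hstk2 : List.replicate (c1 - c2) cf ++ List.replicate (c2 - c1) cs ++ S with
          | nil => simp only [removeStep]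
          | cons u v => simp only [removeStep]; simp [hchf]
        have hrest' : ∀ c, (ch :: (List.replicate c1 cf ++ List.replicate c2 cs ++ rest)).head? = some c →
            c ≠ cf ∧ c ≠ cs := by
          intro c hc
          simp at hc
          subst hc
          exact ⟨hchf, hchs⟩
        have hSb' : (ch :: (List.replicate (c1 - c2) cf ++ List.replicate (c2 - c1) cs ++ S)).head?
            ≠ some cs := by simp [hchs]
        have := ih 0 0 (ch :: (List.replicate c1 cf ++ List.replicate c2 cs ++ rest)) res
          (acc + ((min c1 c2 : Nat) : Int) * lo)
          (ch :: (List.replicate (c1 - c2) cf ++ List.replicate (c2 - c1) cs ++ S))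
          (r + ((min c1 c2 : Nat) : Int) * lo) hrest' hS2' hSb'
        simp only [List.replicate_zero, List.nil_append] at this ⊢
        linarith

-- ===== VERDICT (by name: the statement is the Claim_ definition above) =====
theorem maximumGain_spec : Claim_equal_maximumGain := by
  intro s x y _
  unfold Spec_maximumGain maximumGain maximumGain_alt removeA
  by_cases hxy : x > y
  · have h := main_equiv 'a' 'b' x y (by decide) s.toList 0 0 [] 0 0 [] 0
      (by intro c hc; simp at hc) (by simp) (by simp)
    simp only [List.replicate_zero, List.nil_append, Nat.cast_zero] at h
    simp only [if_pos hxy]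
    linarith
  · have h := main_equiv 'b' 'a' y x (by decide) s.toList 0 0 [] 0 0 [] 0
      (by intro c hc; simp at hc) (by simp) (by simp)
    simp only [List.replicate_zero, List.nil_append, Nat.cast_zero] at h
    simp only [if_neg hxy]
    linarith
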